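-- pv_equiv track=rewrite | github.com/candyasscoder/everfree-outpost | util/gen_interior_shape_table.py | full_table_entry
-- ===== SOURCE A (Python) =====
-- CORNERS_BY_NAME = {'nw': 0, 'sw': 1, 'se': 2, 'ne': 3}
--
-- def explode(x, n):
--     return tuple(i for i in range(n) if ((x >> i) & 1) == 1)
--
-- def name_from_bits(bits):
--     return (
--             ('n' if 0 in bits else '') +
--             ('s' if 2 in bits else '') +
--             ('w' if 1 in bits else '') +
--             ('e' if 3 in bits else '')
--             )
--
-- def full_table_entry(i):
--     edges = explode(i, 4)
--     corners = explode(i >> 4, 4)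
--
--     base = name_from_bits(edges)
--     full_corners = ()
--     if len(edges) == 0:
--         base = 'spot'
--     elif len(edges) == 2:
--         if base not in ('ns', 'we'):
--             full_corners = (CORNERS_BY_NAME[base],)
--     elif len(edges) == 3:
--         if base.startswith('ns'):
--             full_corners = (
--                     CORNERS_BY_NAME[base[0] + base[2]],
--                     CORNERS_BY_NAME[base[1] + base[2]],
--                     )
--         else:
--             full_corners = (
--                     CORNERS_BY_NAME[base[0] + base[1]],
--                     CORNERS_BY_NAME[base[0] + base[2]],
--                     )
--     elif len(edges) == 4:
--         full_corners = (0, 1, 2, 3)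
--
--     full_corners = tuple(sorted(full_corners))
--
--     if len(full_corners) > 0:
--         return base + '/' + ''.join('1' if c in corners else '0' for c in full_corners)
--     else:
--         return base
-- ===== SOURCE B (Python) =====
-- CORNER_EDGES = ((0, 1), (2, 1), (2, 3), (0, 3))  # nw, sw, se, ne: the two adjacent edge bits
--
-- def explode(x, n):
--     return tuple(i for i in range(n) if ((x >> i) & 1) == 1)
--
-- def name_from_bits(bits):
--     return (
--             ('n' if 0 in bits else '') +
--             ('s' if 2 in bits else '') +
--             ('w' if 1 in bits else '') +
--             ('e' if 3 in bits else '')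
--             )
--
-- def full_table_entry(i):
--     edges = explode(i, 4)
--     corners = explode(i >> 4, 4)
--     base = name_from_bits(edges) if edges else 'spot'
--     full_corners = [c for c, (a, b) in enumerate(CORNER_EDGES)
--                     if a in edges and b in edges]
--     if full_corners:
--         return base + '/' + ''.join('1' if c in corners else '0' for c in full_corners)
--     return base
-- ===== Notes on version B (the rewrite author's own statement) =====
-- stated objective: simpler
-- what changed: Replaces A's len(edges) cascade with its string-slice dict lookups by one uniform rule: a corner is full iff both of its adjacent edges are present, scanning corner indices 0..3 once (so no sort and no CORNERS_BY_NAME lookup is needed).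
import Mathlib
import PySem

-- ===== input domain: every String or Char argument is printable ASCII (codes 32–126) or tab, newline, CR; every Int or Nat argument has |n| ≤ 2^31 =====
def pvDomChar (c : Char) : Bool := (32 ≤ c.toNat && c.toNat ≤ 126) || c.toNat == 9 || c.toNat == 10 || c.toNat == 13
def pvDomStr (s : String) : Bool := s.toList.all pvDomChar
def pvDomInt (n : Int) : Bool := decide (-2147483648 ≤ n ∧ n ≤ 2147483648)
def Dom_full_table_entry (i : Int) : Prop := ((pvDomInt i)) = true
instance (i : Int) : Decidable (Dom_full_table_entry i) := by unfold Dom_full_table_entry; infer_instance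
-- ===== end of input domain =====

-- B is a uniform rule (a corner is full iff both adjacent edges are present) replacing A's
-- len(edges) cascade and dict lookups keyed by string slices; objective: simpler, same cost.

-- ===== PORT A =====
-- shared module helper explode(x, n): bit j of x for j in range(n); j is nonnegative there, so x >> j is x >>> j.toNat
def pvExplode (x : Int) (n : Int) : List Int :=
  (PySem.List.pyRange 0 n 1).filter (fun j => PySem.Int.band (x >>> j.toNat) 1 == 1)

-- shared module helper name_from_bits, over List Char (strings are built as char lists, String.ofList at the end)
def pvNameFromBits (bits : List Int) : List Char :=
  (if bits.contains 0 then ['n'] else []) ++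
  (if bits.contains 2 then ['s'] else []) ++
  (if bits.contains 1 then ['w'] else []) ++
  (if bits.contains 3 then ['e'] else [])

def pvCornersByName : PySem.Dict (List Char) Int :=
  PySem.Dict.ofList [(['n','w'], 0), (['s','w'], 1), (['s','e'], 2), (['n','e'], 3)]

-- body of A after the two explode calls (getD defaults are never used: the keys are always present
-- and base is indexed only when it has length 3)
def pvEntryA (edges corners : List Int) : String :=
  let base := pvNameFromBits edges
  let full_corners : List Int :=
    if edges.length == 0 then []
    else if edges.length == 2 then
      (if ¬ (base = ['n','s'] ∨ base = ['w','e']) then [pvCornersByName.getD base 0] else [])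
    else if edges.length == 3 then
      (if PySem.Chars.startswith base ['n','s'] then
        [pvCornersByName.getD [base.getD 0 ' ', base.getD 2 ' '] 0,
         pvCornersByName.getD [base.getD 1 ' ', base.getD 2 ' '] 0]
      else
        [pvCornersByName.getD [base.getD 0 ' ', base.getD 1 ' '] 0,
         pvCornersByName.getD [base.getD 0 ' ', base.getD 2 ' '] 0])
    else if edges.length == 4 then [0, 1, 2, 3]
    else []
  let base := if edges.length == 0 then ['s','p','o','t'] else base
  let full_corners := PySem.List.sorted full_corners (fun x => x) false
  if full_corners.length > 0 then
    String.ofList (base ++ ['/'] ++ full_corners.map (fun c => if corners.contains c then '1' else '0'))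
  else
    String.ofList base

def full_table_entry (i : Int) : String :=
  pvEntryA (pvExplode i 4) (pvExplode (i >>> (4:Nat)) 4)

-- ===== PORT B =====
def pvCornerEdges : List (Int × Int) := [(0, 1), (2, 1), (2, 3), (0, 3)]

-- body of B after the two explode calls
def pvEntryB (edges corners : List Int) : String :=
  let base := if edges ≠ [] then pvNameFromBits edges else ['s','p','o','t']
  let full_corners : List Int :=
    ((PySem.List.enumerate pvCornerEdges).filter
      (fun p => edges.contains p.2.1 && edges.contains p.2.2)).map (fun p => p.1)
  if full_corners ≠ [] then
    String.ofList (base ++ ['/'] ++ full_corners.map (fun c => if corners.contains c then '1' else '0'))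
  else
    String.ofList base

def full_table_entry_alt (i : Int) : String :=
  pvEntryB (pvExplode i 4) (pvExplode (i >>> (4:Nat)) 4)

-- ===== PRECONDITION & SPEC =====
def Spec_full_table_entry (i : Int) (out : String) : Prop := out = full_table_entry_alt i
instance (i : Int) (out : String) : Decidable (Spec_full_table_entry i out) := by unfold Spec_full_table_entry; infer_instance

-- ===== CLAIM (what is proved, stated in full; the proofs are below) =====
def Claim_equal_full_table_entry : Prop := ∀ (i : Int), Dom_full_table_entry i → Spec_full_table_entry i (full_table_entry i)

-- ===== LEMMAS AND PROOFS =====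

-- bit k of i only depends on i mod 256, for k < 8
theorem pv_bit_mod (i : Int) (k : Nat) (hk : k < 8) :
    PySem.Int.band (i >>> k) 1 = PySem.Int.band ((PySem.Int.mod i 256) >>> k) 1 := by
  rw [PySem.Int.band_one, PySem.Int.band_one, Int.shiftRight_eq_div_pow, Int.shiftRight_eq_div_pow,
      PySem.Int.mod_eq_emod_of_pos (show (0:Int) < 256 by norm_num),
      PySem.Int.mod_eq_emod_of_pos (show (0:Int) < 2 by norm_num),
      PySem.Int.mod_eq_emod_of_pos (show (0:Int) < 2 by norm_num)]
  interval_cases k <;> norm_num <;> omega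

-- bit k of i >> 4 only depends on i mod 256, for k < 4
theorem pv_bit_mod' (i : Int) (k : Nat) (hk : k < 4) :
    PySem.Int.band ((i >>> (4:Nat)) >>> k) 1
      = PySem.Int.band (((PySem.Int.mod i 256) >>> (4:Nat)) >>> k) 1 := by
  rw [PySem.Int.band_one, PySem.Int.band_one]
  simp only [Int.shiftRight_eq_div_pow]
  rw [PySem.Int.mod_eq_emod_of_pos (show (0:Int) < 256 by norm_num),
      PySem.Int.mod_eq_emod_of_pos (show (0:Int) < 2 by norm_num),
      PySem.Int.mod_eq_emod_of_pos (show (0:Int) < 2 by norm_num)]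
  interval_cases k <;> norm_num <;> omega

theorem pv_explode_mod (i : Int) :
    pvExplode i 4 = pvExplode (PySem.Int.mod i 256) 4 := by
  unfold pvExplode
  rw [show PySem.List.pyRange 0 4 1 = [0, 1, 2, 3] from by decide]
  apply List.filter_congr
  intro j hj
  simp only [List.mem_cons, List.not_mem_nil, or_false] at hj
  rcases hj with h | h | h | h <;> subst h <;>
    simp only [show ((0:Int).toNat) = 0 from rfl, show ((1:Int).toNat) = 1 from rfl,
      show ((2:Int).toNat) = 2 from rfl, show ((3:Int).toNat) = 3 from rfl]
  · rw [pv_bit_mod i 0 (by norm_num)]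
  · rw [pv_bit_mod i 1 (by norm_num)]
  · rw [pv_bit_mod i 2 (by norm_num)]
  · rw [pv_bit_mod i 3 (by norm_num)]

theorem pv_explode_shift_mod (i : Int) :
    pvExplode (i >>> (4:Nat)) 4 = pvExplode ((PySem.Int.mod i 256) >>> (4:Nat)) 4 := by
  unfold pvExplode
  rw [show PySem.List.pyRange 0 4 1 = [0, 1, 2, 3] from by decide]
  apply List.filter_congr
  intro j hj
  simp only [List.mem_cons, List.not_mem_nil, or_false] at hj
  rcases hj with h | h | h | h <;> subst h <;>
    simp only [show ((0:Int).toNat) = 0 from rfl, show ((1:Int).toNat) = 1 from rfl,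
      show ((2:Int).toNat) = 2 from rfl, show ((3:Int).toNat) = 3 from rfl]
  · rw [pv_bit_mod' i 0 (by norm_num)]
  · rw [pv_bit_mod' i 1 (by norm_num)]
  · rw [pv_bit_mod' i 2 (by norm_num)]
  · rw [pv_bit_mod' i 3 (by norm_num)]

-- A = B on the 256 residues, by computation
set_option maxRecDepth 4096 in
theorem pv_small (r : Fin 256) :
    full_table_entry (r : Int) = full_table_entry_alt (r : Int) := by
  revert r
  decide

-- ===== VERDICT (by name: the statement is the Claim_ definition above) =====
theorem full_table_entry_spec : Claim_equal_full_table_entry := by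
  intro i _
  unfold Spec_full_table_entry
  have hA : full_table_entry i = full_table_entry (PySem.Int.mod i 256) := by
    unfold full_table_entry
    rw [pv_explode_mod, pv_explode_shift_mod]
  have hB : full_table_entry_alt i = full_table_entry_alt (PySem.Int.mod i 256) := by
    unfold full_table_entry_alt
    rw [pv_explode_mod, pv_explode_shift_mod]
  have hm : PySem.Int.mod i 256 = i % 256 := PySem.Int.mod_eq_emod_of_pos (show (0:Int) < 256 by norm_num)
  have h0 : 0 ≤ i % 256 := Int.emod_nonneg i (by norm_num)
  have h1 : i % 256 < 256 := Int.emod_lt_of_pos i (by norm_num)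
  have hr : i % 256 = ((⟨(i % 256).toNat, by omega⟩ : Fin 256) : Int) := by
    simp [Int.toNat_of_nonneg h0]
  rw [hA, hB, hm, hr]
  exact pv_small _
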